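-- pv_equiv track=rewrite | github.com/akhilm1607/Expand_espresso | expand.py | blocking_matrix
-- ===== SOURCE A (Python) =====
-- def blocking_matrix(cube, fn_bar):
--     fn_bar_split = fn_bar.split('+')
--     no_comp_cubes = len(fn_bar_split)
--     no_cube_lit = len(cube)
--     #A matrix with all entries as 0s is created.
--     b_matrix = [[0 for j in range(no_comp_cubes)] for i in range(no_cube_lit)]
--     #If lit is present as complemeted form in the cube of fbar, then 1 is added to that respective element
--     for lit in range(0, no_cube_lit):
--         for comp_cube in range(0, no_comp_cubes):
--             if cube[lit].isupper():
--                 if cube[lit].lower() in fn_bar_split[comp_cube]: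
--                     b_matrix[lit][comp_cube] = 1
--                 else:
--                     continue
--             elif cube[lit].islower():
--                 if cube[lit].upper() in fn_bar_split[comp_cube]:
--                     b_matrix[lit][comp_cube] = 1
--                 else:
--                     continue
--
--     return b_matrix
-- ===== SOURCE B (Python) =====
-- def blocking_matrix(cube, fn_bar):
--     cubes = fn_bar.split('+')
--     # inverted index: complement character -> list of literal positions needing it
--     index = {}
--     for lit, c in enumerate(cube):
--         if c.isupper():
--             index.setdefault(c.lower(), []).append(lit)
--         elif c.islower():
--             index.setdefault(c.upper(), []).append(lit)
--     b_matrix = [[0] * len(cubes) for _ in cube]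
--     for j, s in enumerate(cubes):
--         for ch in s:
--             for lit in index.get(ch, ()):
--                 b_matrix[lit][j] = 1
--     return b_matrix
-- ===== Notes on version B (the rewrite author's own statement) =====
-- stated objective: faster
-- what changed: Instead of testing, for every (literal, fbar-cube) pair, whether the complemented literal occurs in the cube string, B builds an inverted index from each complement character to the list of literal positions once, then scans each fbar cube's characters a single time and scatters 1s into the matrix via the index.
import Mathlib
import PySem

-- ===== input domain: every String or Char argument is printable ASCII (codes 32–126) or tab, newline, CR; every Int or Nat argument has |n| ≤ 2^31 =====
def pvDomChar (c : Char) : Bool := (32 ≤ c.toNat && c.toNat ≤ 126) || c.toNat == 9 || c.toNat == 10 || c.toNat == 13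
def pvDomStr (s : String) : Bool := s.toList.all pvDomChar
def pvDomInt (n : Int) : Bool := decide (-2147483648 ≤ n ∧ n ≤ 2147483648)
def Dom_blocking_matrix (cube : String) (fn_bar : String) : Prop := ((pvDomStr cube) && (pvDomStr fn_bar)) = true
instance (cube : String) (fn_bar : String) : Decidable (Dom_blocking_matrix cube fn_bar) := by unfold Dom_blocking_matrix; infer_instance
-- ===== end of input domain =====

-- B replaces A's per-(literal, cube) membership tests by an inverted index (complement char → literal
-- positions) built once, then a single character scan over each fbar cube scattering 1s (objective: faster).

-- shared mutation primitive: b_matrix[i][j] = 1 (no-op out of range, as indices here are always in range)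
def pvSet2 (m : List (List Int)) (i j : Nat) : List (List Int) :=
  m.set i ((m.getD i []).set j 1)

-- ===== PORT A =====
def blocking_matrix (cube : String) (fn_bar : String) : List (List Int) :=
  let fn_bar_split : List (List Char) := PySem.Chars.splitOn fn_bar.toList ['+']
  let no_comp_cubes : Int := PySem.List.len fn_bar_split
  let no_cube_lit : Int := PySem.Str.len cube
  let b_matrix : List (List Int) :=
    (PySem.List.pyRange 0 no_cube_lit 1).map (fun _ =>
      (PySem.List.pyRange 0 no_comp_cubes 1).map (fun _ => (0 : Int)))
  (PySem.List.pyRange 0 no_cube_lit 1).foldl (fun m lit =>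
    (PySem.List.pyRange 0 no_comp_cubes 1).foldl (fun m comp_cube =>
      match PySem.Str.pyGet? cube lit with
      | none => m  -- unreachable: lit ranges over the valid indices of cube
      | some c =>
        if PySem.Chars.isupper c then
          if PySem.Chars.isIn [PySem.Chars.lowerChar c] (PySem.List.pyGetD fn_bar_split comp_cube []) then
            pvSet2 m lit.toNat comp_cube.toNat
          else m
        else if PySem.Chars.islower c then
          if PySem.Chars.isIn [PySem.Chars.upperChar c] (PySem.List.pyGetD fn_bar_split comp_cube []) then
            pvSet2 m lit.toNat comp_cube.toNat
          else m
        else m) m) b_matrix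

-- ===== PORT B =====
def blocking_matrix_alt (cube : String) (fn_bar : String) : List (List Int) :=
  let cubes : List (List Char) := PySem.Chars.splitOn fn_bar.toList ['+']
  let index : PySem.Dict Char (List Int) :=
    (PySem.List.enumerate cube.toList 0).foldl (fun d p =>
      if PySem.Chars.isupper p.2 then
        d.insert (PySem.Chars.lowerChar p.2) (d.getD (PySem.Chars.lowerChar p.2) [] ++ [p.1])
      else if PySem.Chars.islower p.2 then
        d.insert (PySem.Chars.upperChar p.2) (d.getD (PySem.Chars.upperChar p.2) [] ++ [p.1])
      else d) PySem.Dict.empty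
  let b_matrix : List (List Int) :=
    cube.toList.map (fun _ => PySem.List.pyRepeat [(0 : Int)] (PySem.List.len cubes))
  (PySem.List.enumerate cubes 0).foldl (fun m q =>
    q.2.foldl (fun m ch =>
      (index.getD ch []).foldl (fun m lit => pvSet2 m lit.toNat q.1.toNat) m) m) b_matrix

-- ===== PRECONDITION & SPEC =====
def Spec_blocking_matrix (cube : String) (fn_bar : String) (out : List (List Int)) : Prop := out = blocking_matrix_alt cube fn_bar
instance (cube : String) (fn_bar : String) (out : List (List Int)) : Decidable (Spec_blocking_matrix cube fn_bar out) := by unfold Spec_blocking_matrix; infer_instance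

-- ===== CLAIM (what is proved, stated in full; the proofs are below) =====
def Claim_equal_blocking_matrix : Prop := ∀ (cube : String) (fn_bar : String), Dom_blocking_matrix cube fn_bar → Spec_blocking_matrix cube fn_bar (blocking_matrix cube fn_bar)

-- ===== LEMMAS AND PROOFS =====

-- the complement character of a cube literal, if the literal is cased (A's two branches, B's index key)
def pvComp? (c : Char) : Option Char :=
  if PySem.Chars.isupper c then some (PySem.Chars.lowerChar c)
  else if PySem.Chars.islower c then some (PySem.Chars.upperChar c)
  else none

def pvGet2 (m : List (List Int)) (i j : Nat) : Option Int := (m[i]?.getD [])[j]?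
def pvRowlen (m : List (List Int)) (i : Nat) : Nat := (m[i]?.getD []).length
def pvWriteFold (ws : List (Nat × Nat)) (m : List (List Int)) : List (List Int) :=
  ws.foldl (fun m w => pvSet2 m w.1 w.2) m
def pvZero (r c : Nat) : List (List Int) := List.replicate r (List.replicate c 0)

-- A's test for cell (lit, comp_cube), read off its inner loop body
def pvCondA (cube : String) (fbs : List (List Char)) (lit cc : Int) : Bool :=
  match PySem.Str.pyGet? cube lit with
  | none => false
  | some c =>
    if PySem.Chars.isupper c then
      PySem.Chars.isIn [PySem.Chars.lowerChar c] (PySem.List.pyGetD fbs cc [])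
    else if PySem.Chars.islower c then
      PySem.Chars.isIn [PySem.Chars.upperChar c] (PySem.List.pyGetD fbs cc [])
    else false

-- the cells A writes, flattened
def pvWSA (cube : String) (fbs : List (List Char)) : List (Nat × Nat) :=
  (PySem.List.pyRange 0 (PySem.Str.len cube)).flatMap (fun lit =>
    ((PySem.List.pyRange 0 (PySem.List.len fbs)).filter (pvCondA cube fbs lit)).map
      (fun cc => (lit.toNat, cc.toNat)))

-- B's index-building step and index
def pvStep (d : PySem.Dict Char (List Int)) (p : Int × Char) : PySem.Dict Char (List Int) :=
  if PySem.Chars.isupper p.2 then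
    d.insert (PySem.Chars.lowerChar p.2) (d.getD (PySem.Chars.lowerChar p.2) [] ++ [p.1])
  else if PySem.Chars.islower p.2 then
    d.insert (PySem.Chars.upperChar p.2) (d.getD (PySem.Chars.upperChar p.2) [] ++ [p.1])
  else d

def pvIdx (cs : List Char) : PySem.Dict Char (List Int) :=
  (PySem.List.enumerate cs 0).foldl pvStep PySem.Dict.empty

-- the cells B writes, flattened
def pvWSB (cs : List Char) (cubes : List (List Char)) : List (Nat × Nat) :=
  (PySem.List.enumerate cubes 0).flatMap (fun q =>
    q.2.flatMap (fun ch => ((pvIdx cs).getD ch []).map (fun lit => (lit.toNat, q.1.toNat))))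

-- the common characterisation of a written cell
def pvHit (cs : List Char) (fbs : List (List Char)) (i j : Nat) : Prop :=
  ∃ c, cs[i]? = some c ∧ j < fbs.length ∧ ∃ ch, pvComp? c = some ch ∧ ch ∈ fbs.getD j []

theorem pvSet2_length (m : List (List Int)) (a b : Nat) : (pvSet2 m a b).length = m.length := by
  simp [pvSet2]

theorem pvSet2_rowlen (m : List (List Int)) (a b i : Nat) :
    pvRowlen (pvSet2 m a b) i = pvRowlen m i := by
  simp only [pvRowlen, pvSet2, List.getElem?_set]
  split_ifs with h1 h2
  · subst h1; simp [List.getD_eq_getElem?_getD]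
  · subst h1
    rw [List.getElem?_eq_none (Nat.le_of_not_lt h2)]
  · rfl

theorem pvGet2_pvSet2 (m : List (List Int)) (a b i j : Nat) :
    pvGet2 (pvSet2 m a b) i j =
      if i = a ∧ j = b ∧ a < m.length ∧ b < pvRowlen m a then some 1 else pvGet2 m i j := by
  simp only [pvGet2, pvSet2, pvRowlen, List.getElem?_set, List.getD_eq_getElem?_getD]
  by_cases h1 : a = i
  · subst h1
    by_cases h2 : a < m.length
    · by_cases h3 : b = j
      · subst h3
        simp only [if_pos h2, if_true, true_and]
        simp only [h2]
        by_cases h4 : b < (m[a]?.getD []).length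
        · simp [h4]
        · simp [h4]
      · have h3' : ¬ j = b := fun h => h3 h.symm
        simp [h2, h3, h3']
    · simp [h2]
  · have h1' : ¬ i = a := fun h => h1 h.symm
    simp [h1, h1']

theorem pvGet2_pvWriteFold (ws : List (Nat × Nat)) (m : List (List Int)) (i j : Nat) :
    pvGet2 (pvWriteFold ws m) i j =
      if (i, j) ∈ ws ∧ i < m.length ∧ j < pvRowlen m i then some 1 else pvGet2 m i j := by
  induction ws generalizing m with
  | nil => simp [pvWriteFold]
  | cons w ws ih =>
    obtain ⟨a, b⟩ := w
    have hstep : pvWriteFold ((a, b) :: ws) m = pvWriteFold ws (pvSet2 m a b) := rfl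
    rw [hstep, ih, pvSet2_length, pvSet2_rowlen, pvGet2_pvSet2]
    by_cases hb : i < m.length ∧ j < pvRowlen m i
    · by_cases hm : (i, j) ∈ ws
      · simp [hm, hb]
      · by_cases hw : (i, j) = (a, b)
        · have hij : i = a ∧ j = b := by simpa [Prod.ext_iff] using hw
          obtain ⟨hi, hj⟩ := hij
          subst hi; subst hj
          simp [hm, hb]
        · have hno : ¬ (i = a ∧ j = b ∧ a < m.length ∧ b < pvRowlen m a) := by
            rintro ⟨hi, hj, -, -⟩; exact hw (by simp [hi, hj])
          simp [hm, hb, hw, hno]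
    · have hno : ¬ (i = a ∧ j = b ∧ a < m.length ∧ b < pvRowlen m a) := by
        rintro ⟨hi, hj, hx, hy⟩; subst hi; subst hj; exact hb ⟨hx, hy⟩
      simp [hb, hno]

theorem pvWriteFold_length (ws : List (Nat × Nat)) (m : List (List Int)) :
    (pvWriteFold ws m).length = m.length := by
  induction ws generalizing m with
  | nil => rfl
  | cons w ws ih =>
    have hstep : pvWriteFold (w :: ws) m = pvWriteFold ws (pvSet2 m w.1 w.2) := rfl
    rw [hstep, ih, pvSet2_length]

theorem pv_matrix_ext (m1 m2 : List (List Int)) (hl : m1.length = m2.length)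
    (h : ∀ i j, pvGet2 m1 i j = pvGet2 m2 i j) : m1 = m2 := by
  apply List.ext_getElem?
  intro i
  by_cases hi : i < m1.length
  · have h1 : m1[i]? = some m1[i] := List.getElem?_eq_getElem hi
    have h2 : m2[i]? = some m2[i] := List.getElem?_eq_getElem (hl ▸ hi)
    rw [h1, h2]
    congr 1
    apply List.ext_getElem?
    intro j
    have := h i j
    simpa [pvGet2, h1, h2] using this
  · rw [List.getElem?_eq_none (Nat.le_of_not_lt hi),
        List.getElem?_eq_none (Nat.le_of_not_lt (hl ▸ hi))]

theorem pvWriteFold_eq_of_mem_iff (ws1 ws2 : List (Nat × Nat)) (m : List (List Int))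
    (h : ∀ w, w ∈ ws1 ↔ w ∈ ws2) : pvWriteFold ws1 m = pvWriteFold ws2 m := by
  apply pv_matrix_ext
  · rw [pvWriteFold_length, pvWriteFold_length]
  · intro i j
    rw [pvGet2_pvWriteFold, pvGet2_pvWriteFold,
      if_congr (iff_of_eq (congrArg (fun p => p ∧ i < m.length ∧ j < pvRowlen m i)
        (propext (h (i, j))))) rfl rfl]

theorem pv_foldl_writeFold {α : Type} (l : List α) (f : α → List (Nat × Nat))
    (m : List (List Int)) :
    l.foldl (fun m x => pvWriteFold (f x) m) m = pvWriteFold (l.flatMap f) m := by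
  unfold pvWriteFold
  rw [List.foldl_flatMap]

-- A's inner loop over comp cubes, as a write-fold
theorem pvA_body (cube : String) (fbs : List (List Char)) (lit : Int) (m : List (List Int)) :
    (PySem.List.pyRange 0 (PySem.List.len fbs) 1).foldl (fun m comp_cube =>
      match PySem.Str.pyGet? cube lit with
      | none => m
      | some c =>
        if PySem.Chars.isupper c then
          if PySem.Chars.isIn [PySem.Chars.lowerChar c] (PySem.List.pyGetD fbs comp_cube []) then
            pvSet2 m lit.toNat comp_cube.toNat
          else m
        else if PySem.Chars.islower c then
          if PySem.Chars.isIn [PySem.Chars.upperChar c] (PySem.List.pyGetD fbs comp_cube []) then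
            pvSet2 m lit.toNat comp_cube.toNat
          else m
        else m) m
    = pvWriteFold
        (((PySem.List.pyRange 0 (PySem.List.len fbs)).filter (pvCondA cube fbs lit)).map
          (fun cc => (lit.toNat, cc.toNat))) m := by
  have hfun : (fun (m : List (List Int)) (comp_cube : Int) =>
      match PySem.Str.pyGet? cube lit with
      | none => m
      | some c =>
        if PySem.Chars.isupper c then
          if PySem.Chars.isIn [PySem.Chars.lowerChar c] (PySem.List.pyGetD fbs comp_cube []) then
            pvSet2 m lit.toNat comp_cube.toNat
          else m
        else if PySem.Chars.islower c then
          if PySem.Chars.isIn [PySem.Chars.upperChar c] (PySem.List.pyGetD fbs comp_cube []) then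
            pvSet2 m lit.toNat comp_cube.toNat
          else m
        else m)
      = fun m cc => if pvCondA cube fbs lit cc = true then pvSet2 m lit.toNat cc.toNat else m := by
    funext m cc
    unfold pvCondA
    cases hc : PySem.Str.pyGet? cube lit with
    | none => simp
    | some c =>
      by_cases h1 : PySem.Chars.isupper c
      · simp [h1]
      · by_cases h2 : PySem.Chars.islower c <;> simp [h1, h2]
  rw [hfun, PySem.List.foldl_if_eq_foldl_filter]
  unfold pvWriteFold
  rw [List.foldl_map]

-- A is the write-fold of its flattened write list over the zero matrix
theorem pvA_shape (cube : String) (fn_bar : String) :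
    blocking_matrix cube fn_bar =
      pvWriteFold (pvWSA cube (PySem.Chars.splitOn fn_bar.toList ['+']))
        (pvZero cube.toList.length (PySem.Chars.splitOn fn_bar.toList ['+']).length) := by
  unfold blocking_matrix
  dsimp only
  rw [funext (fun m => funext (fun lit => pvA_body cube (PySem.Chars.splitOn fn_bar.toList ['+']) lit m)),
    pv_foldl_writeFold]
  unfold pvWSA pvZero
  rw [List.map_const', List.map_const']
  simp [PySem.List.length_pyRange_one, PySem.Str.len_eq, PySem.List.len_eq]

-- B's per-cube scatter (one fbar cube q), as a write-fold
theorem pvB_body (idx : PySem.Dict Char (List Int)) (q : Int × List Char) (m : List (List Int)) :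
    q.2.foldl (fun m ch =>
      (idx.getD ch []).foldl (fun m lit => pvSet2 m lit.toNat q.1.toNat) m) m
    = pvWriteFold (q.2.flatMap (fun ch =>
        (idx.getD ch []).map (fun lit => (lit.toNat, q.1.toNat)))) m := by
  have hfun : (fun (m : List (List Int)) (ch : Char) =>
      (idx.getD ch []).foldl (fun m lit => pvSet2 m lit.toNat q.1.toNat) m)
      = fun m ch => pvWriteFold ((idx.getD ch []).map (fun lit => (lit.toNat, q.1.toNat))) m := by
    funext m ch
    unfold pvWriteFold
    rw [List.foldl_map]
  rw [hfun, pv_foldl_writeFold]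

-- B is the write-fold of its flattened write list over the same zero matrix
theorem pvB_shape (cube : String) (fn_bar : String) :
    blocking_matrix_alt cube fn_bar =
      pvWriteFold (pvWSB cube.toList (PySem.Chars.splitOn fn_bar.toList ['+']))
        (pvZero cube.toList.length (PySem.Chars.splitOn fn_bar.toList ['+']).length) := by
  unfold blocking_matrix_alt
  dsimp only
  have hidx : (PySem.List.enumerate cube.toList 0).foldl (fun d (p : Int × Char) =>
      if PySem.Chars.isupper p.2 then
        d.insert (PySem.Chars.lowerChar p.2) (d.getD (PySem.Chars.lowerChar p.2) [] ++ [p.1])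
      else if PySem.Chars.islower p.2 then
        d.insert (PySem.Chars.upperChar p.2) (d.getD (PySem.Chars.upperChar p.2) [] ++ [p.1])
      else d) PySem.Dict.empty = pvIdx cube.toList := rfl
  rw [hidx,
    funext (fun m => funext (fun q => pvB_body (pvIdx cube.toList) q m)),
    pv_foldl_writeFold]
  unfold pvWSB pvZero
  rw [List.map_const']
  rw [PySem.List.pyRepeat_singleton]
  simp [PySem.List.len_eq]

theorem pv_mem_WSA (cube : String) (fbs : List (List Char)) (i j : Nat) :
    (i, j) ∈ pvWSA cube fbs ↔ pvHit cube.toList fbs i j := by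
  unfold pvWSA pvHit
  rw [List.mem_flatMap]
  constructor
  · rintro ⟨lit, hlit, hm⟩
    rw [List.mem_map] at hm
    obtain ⟨cc, hcc, heq⟩ := hm
    rw [List.mem_filter] at hcc
    obtain ⟨hccr, hcond⟩ := hcc
    rw [PySem.List.mem_pyRange_one] at hlit hccr
    obtain ⟨hij1, hij2⟩ : lit.toNat = i ∧ cc.toNat = j := by simpa [Prod.ext_iff] using heq
    have hliti : lit = (i : Int) := by omega
    have hccj : cc = (j : Int) := by omega
    subst hliti; subst hccj
    unfold pvCondA at hcond
    rw [PySem.Str.pyGet?_eq] at hcond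
    have hget : PySem.Chars.pyGet? cube.toList (i : Int) = cube.toList[i]? :=
      PySem.List.pyGet?_natCast cube.toList i
    rw [hget] at hcond
    cases hc : cube.toList[i]? with
    | none => rw [hc] at hcond; simp at hcond
    | some c =>
      rw [hc] at hcond
      dsimp only at hcond
      refine ⟨c, rfl, ?_, ?_⟩
      · have : (j : Int) < PySem.List.len fbs := hccr.2
        rw [PySem.List.len_eq] at this
        exact_mod_cast this
      · have hgd : PySem.List.pyGetD fbs (j : Int) [] = fbs.getD j [] :=
          PySem.List.pyGetD_natCast fbs j []
        rw [hgd] at hcond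
        by_cases h1 : PySem.Chars.isupper c
        · refine ⟨PySem.Chars.lowerChar c, by simp [pvComp?, h1], ?_⟩
          rw [h1] at hcond
          simp only [if_true] at hcond
          have := (PySem.Chars.isIn_iff_infix _ _).1 (by simpa using hcond)
          exact (List.singleton_infix_iff _ _).1 this
        · by_cases h2 : PySem.Chars.islower c
          · refine ⟨PySem.Chars.upperChar c, by simp [pvComp?, h1, h2], ?_⟩
            simp only [h1, h2] at hcond
            have := (PySem.Chars.isIn_iff_infix _ _).1 (by simpa using hcond)
            exact (List.singleton_infix_iff _ _).1 this
          · simp [h1, h2] at hcond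
  · rintro ⟨c, hc, hj, ch, hcomp, hmem⟩
    have hi : i < cube.toList.length := (List.getElem?_eq_some_iff.1 hc).1
    refine ⟨(i : Int), ?_, ?_⟩
    · rw [PySem.List.mem_pyRange_one, PySem.Str.len_eq]
      constructor
      · exact_mod_cast Nat.zero_le i
      · exact_mod_cast hi
    · rw [List.mem_map]
      refine ⟨(j : Int), ?_, by simp⟩
      rw [List.mem_filter, PySem.List.mem_pyRange_one, PySem.List.len_eq]
      refine ⟨⟨by exact_mod_cast Nat.zero_le j, by exact_mod_cast hj⟩, ?_⟩
      unfold pvCondA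
      rw [PySem.Str.pyGet?_eq]
      have hget : PySem.Chars.pyGet? cube.toList (i : Int) = cube.toList[i]? :=
        PySem.List.pyGet?_natCast cube.toList i
      rw [hget, hc]
      dsimp only
      have hgd : PySem.List.pyGetD fbs (j : Int) [] = fbs.getD j [] :=
        PySem.List.pyGetD_natCast fbs j []
      rw [hgd]
      have hin : ∀ x : Char, x ∈ fbs.getD j [] →
          PySem.Chars.isIn [x] (fbs.getD j []) = true := fun x hx =>
        (PySem.Chars.isIn_iff_infix _ _).2 ((List.singleton_infix_iff _ _).2 hx)
      unfold pvComp? at hcomp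
      by_cases h1 : PySem.Chars.isupper c
      · rw [if_pos h1] at hcomp
        obtain rfl : PySem.Chars.lowerChar c = ch := by simpa using hcomp
        rw [if_pos h1]
        exact hin _ hmem
      · by_cases h2 : PySem.Chars.islower c
        · rw [if_neg h1, if_pos h2] at hcomp
          obtain rfl : PySem.Chars.upperChar c = ch := by simpa using hcomp
          rw [if_neg h1, if_pos h2]
          exact hin _ hmem
        · rw [if_neg h1, if_neg h2] at hcomp; exact absurd hcomp (by simp)

theorem pvStep_getD (d : PySem.Dict Char (List Int)) (p : Int × Char) (ch : Char) :
    (pvStep d p).getD ch [] =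
      if pvComp? p.2 = some ch then d.getD ch [] ++ [p.1] else d.getD ch [] := by
  obtain ⟨k, c⟩ := p
  simp only [pvStep, pvComp?]
  by_cases h1 : PySem.Chars.isupper c
  · simp only [h1, if_true, PySem.Dict.getD_insert, Option.some.injEq]
    by_cases he : ch = PySem.Chars.lowerChar c
    · simp [he]
    · have he' : ¬ PySem.Chars.lowerChar c = ch := fun h => he h.symm
      simp [he, he']
  · by_cases h2 : PySem.Chars.islower c
    · simp only [h1, h2, if_false, if_true, Bool.false_eq_true, PySem.Dict.getD_insert,
        Option.some.injEq]
      by_cases he : ch = PySem.Chars.upperChar c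
      · simp [he]
      · have he' : ¬ PySem.Chars.upperChar c = ch := fun h => he h.symm
        simp [he, he']
    · simp [h1, h2]

theorem pv_mem_idx_aux (cs : List Char) (s : Int) (d : PySem.Dict Char (List Int))
    (ch : Char) (lit : Int) :
    lit ∈ ((PySem.List.enumerate cs s).foldl pvStep d).getD ch [] ↔
      lit ∈ d.getD ch [] ∨
        ∃ n : Nat, ∃ _ : n < cs.length, pvComp? cs[n] = some ch ∧ lit = s + n := by
  induction cs generalizing s d with
  | nil => simp [PySem.List.enumerate]
  | cons c cs ih =>
    have hcons : PySem.List.enumerate (c :: cs) s = (s, c) :: PySem.List.enumerate cs (s + 1) := rfl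
    rw [hcons, List.foldl_cons, ih, pvStep_getD]
    constructor
    · rintro (h | ⟨n, hn, hc, rfl⟩)
      · by_cases hcc : pvComp? c = some ch
        · rw [if_pos hcc] at h
          rcases List.mem_append.1 h with h | h
          · exact Or.inl h
          · simp only [List.mem_singleton] at h
            subst h
            exact Or.inr ⟨0, by simp, by simpa using hcc, by simp⟩
        · rw [if_neg hcc] at h; exact Or.inl h
      · exact Or.inr ⟨n + 1, by simpa using hn, by simpa using hc, by push_cast; ring⟩
    · rintro (h | ⟨n, hn, hc, rfl⟩)
      · left
        split_ifs with hcc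
        · exact List.mem_append.2 (Or.inl h)
        · exact h
      · cases n with
        | zero =>
          left
          rw [if_pos (by simpa using hc)]
          simp
        | succ m => exact Or.inr ⟨m, by simpa using hn, by simpa using hc, by push_cast; ring⟩

theorem pv_mem_idx (cs : List Char) (ch : Char) (lit : Int) :
    lit ∈ (pvIdx cs).getD ch [] ↔
      ∃ n : Nat, ∃ _ : n < cs.length, pvComp? cs[n] = some ch ∧ lit = n := by
  rw [pvIdx, pv_mem_idx_aux]
  simp

theorem pv_mem_WSB (cs : List Char) (cubes : List (List Char)) (i j : Nat) :
    (i, j) ∈ pvWSB cs cubes ↔ pvHit cs cubes i j := by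
  unfold pvWSB pvHit
  rw [PySem.List.enumerate_eq_map_pyRange cubes []]
  rw [List.mem_flatMap]
  constructor
  · rintro ⟨q, hq, hm⟩
    rw [List.mem_map] at hq
    obtain ⟨k, hk, rfl⟩ := hq
    rw [PySem.List.mem_pyRange_one] at hk
    rw [List.mem_flatMap] at hm
    obtain ⟨ch, hch, hm⟩ := hm
    rw [List.mem_map] at hm
    obtain ⟨lit, hlit, heq⟩ := hm
    rw [pv_mem_idx] at hlit
    obtain ⟨n, hn, hcomp, rfl⟩ := hlit
    obtain ⟨hi, hj⟩ : (n : Int).toNat = i ∧ k.toNat = j := by simpa [Prod.ext_iff] using heq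
    have hni : n = i := by omega
    subst hni
    have hkj : k = (j : Int) := by omega
    subst hkj
    refine ⟨cs[n], List.getElem?_eq_getElem hn, ?_, ⟨ch, hcomp, ?_⟩⟩
    · have : (j : Int) < PySem.List.len cubes := hk.2
      rw [PySem.List.len_eq] at this
      exact_mod_cast this
    · simpa [PySem.List.pyGetD_natCast cubes j []] using hch
  · rintro ⟨c, hc, hj, ch, hcomp, hmem⟩
    have hi : i < cs.length := (List.getElem?_eq_some_iff.1 hc).1
    have hcv : cs[i] = c := (List.getElem?_eq_some_iff.1 hc).2
    refine ⟨((j : Int), PySem.List.pyGetD cubes (j : Int) []), ?_, ?_⟩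
    · rw [List.mem_map]
      refine ⟨(j : Int), ?_, rfl⟩
      rw [PySem.List.mem_pyRange_one, PySem.List.len_eq]
      exact ⟨by exact_mod_cast Nat.zero_le j, by exact_mod_cast hj⟩
    · rw [List.mem_flatMap]
      refine ⟨ch, ?_, ?_⟩
      · simpa [PySem.List.pyGetD_natCast cubes j []] using hmem
      · rw [List.mem_map]
        refine ⟨(i : Int), ?_, by simp⟩
        rw [pv_mem_idx]
        exact ⟨i, hi, by rw [hcv]; exact hcomp, rfl⟩

-- ===== VERDICT (by name: the statement is the Claim_ definition above) =====
theorem blocking_matrix_spec : Claim_equal_blocking_matrix := by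
  intro cube fn_bar _
  unfold Spec_blocking_matrix
  rw [pvA_shape, pvB_shape]
  exact pvWriteFold_eq_of_mem_iff _ _ _ (fun w => by
    obtain ⟨i, j⟩ := w
    rw [pv_mem_WSA, pv_mem_WSB])
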